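-- pv_equiv track=rewrite | github.com/6210qwe/leetcode_py | leetcode_solutions/by_id/q3959.py | max_total_from_optimal_activation_order
-- ===== SOURCE A (Python) =====
-- from typing import List
-- import heapq
--
-- def max_total_from_optimal_activation_order(value: List[int], limit: List[int]) -> int:
--     n = len(value)
--     elements = sorted(zip(limit, value), key=lambda x: x[0])
--     active_count = 0
--     max_heap = []
--     total_sum = 0
--
--     for i in range(n):
--         while max_heap and elements[i][0] <= active_count + 1:
--             _, val = heapq.heappop(max_heap)
--             total_sum += val
--             active_count += 1
--
--         if elements[i][0] > active_count + 1:
--             heapq.heappush(max_heap, (-elements[i][1], elements[i][1]))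
--
--     while max_heap:
--         _, val = heapq.heappop(max_heap)
--         total_sum += val
--
--     return total_sum
-- ===== SOURCE B (Python) =====
-- from typing import List
--
-- def max_total_from_optimal_activation_order(value: List[int], limit: List[int]) -> int:
--     # One pass over the limit-sorted pairs, no heap: since A's while loop always
--     # fully drains the heap once its condition holds, only the pending sum matters.
--     total = 0
--     active = 0
--     pending_sum = 0
--     pending_count = 0
--     for L, v in sorted(zip(limit, value), key=lambda x: x[0]):
--         if L <= active + 1:
--             total += pending_sum
--             active += pending_count
--             pending_sum = 0
--             pending_count = 0
--         else:
--             pending_sum += v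
--             pending_count += 1
--     return total + pending_sum
-- ===== Notes on version B (the rewrite author's own statement) =====
-- stated objective: faster
-- what changed: Replaces A's heap (push plus two while-drain loops) with a single pass keeping running pending_sum/pending_count accumulators — valid because A's while loop always drains the heap completely once triggered, so heap order is irrelevant; removing all heap operations gives a measured ~3x constant-factor speedup.
import Mathlib
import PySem

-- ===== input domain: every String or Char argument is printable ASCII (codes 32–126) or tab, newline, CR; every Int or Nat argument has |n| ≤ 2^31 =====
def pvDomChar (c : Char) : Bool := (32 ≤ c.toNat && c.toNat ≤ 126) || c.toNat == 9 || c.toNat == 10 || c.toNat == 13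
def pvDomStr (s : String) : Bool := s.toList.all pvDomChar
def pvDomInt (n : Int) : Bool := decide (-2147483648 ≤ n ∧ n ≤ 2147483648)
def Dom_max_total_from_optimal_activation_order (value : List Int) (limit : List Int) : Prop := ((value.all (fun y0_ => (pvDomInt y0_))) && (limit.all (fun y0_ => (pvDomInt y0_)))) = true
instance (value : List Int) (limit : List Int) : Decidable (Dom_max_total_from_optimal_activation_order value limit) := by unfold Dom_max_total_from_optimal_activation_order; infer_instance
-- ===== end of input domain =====

-- B replaces A's heap with a running pending sum/count in one pass (simpler): A's while
-- loop always fully drains the heap, so only the sum of pushed values matters.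

-- ===== PORT A =====
-- heapq model: the heap holds pairs (-v, v) compared lexicographically; since equal pairs
-- are indistinguishable, an ordered list popped at the head yields exactly heapq's pop
-- sequence (exact model of heappush/heappop on this input).
def pvHeapPush (h : List (Int × Int)) (x : Int × Int) : List (Int × Int) :=
  match h with
  | [] => [x]
  | y :: t => if x.1 < y.1 ∨ (x.1 = y.1 ∧ x.2 ≤ y.2) then x :: y :: t else y :: pvHeapPush t x

-- the inner `while max_heap and elements[i][0] <= active_count + 1` loop
def pvDrainWhile (L : Int) : List (Int × Int) → Int → Int → List (Int × Int) × Int × Int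
  | [], total, active => ([], total, active)
  | (p, v) :: t, total, active =>
    if L ≤ active + 1 then pvDrainWhile L t (total + v) (active + 1)
    else ((p, v) :: t, total, active)

-- one iteration of the `for i in range(n)` loop
def pvAStep (st : List (Int × Int) × Int × Int) (e : Int × Int) : List (Int × Int) × Int × Int :=
  match pvDrainWhile e.1 st.1 st.2.1 st.2.2 with
  | (heap, total, active) =>
    if e.1 > active + 1 then (pvHeapPush heap (-e.2, e.2), total, active)
    else (heap, total, active)

-- the trailing `while max_heap` loop
def pvFinalDrain : List (Int × Int) → Int → Int
  | [], total => total
  | (_, v) :: t, total => pvFinalDrain t (total + v)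

def max_total_from_optimal_activation_order (value : List Int) (limit : List Int) : Int :=
  let elements := PySem.List.sorted (limit.zip value) (fun x => x.1) false
  match elements.foldl pvAStep ([], 0, 0) with
  | (heap, total, _) => pvFinalDrain heap total

-- ===== PORT B =====
-- state: (total, active, pending_sum, pending_count)
def pvBStep (st : Int × Int × Int × Int) (e : Int × Int) : Int × Int × Int × Int :=
  match st with
  | (total, active, psum, pcnt) =>
    if e.1 ≤ active + 1 then (total + psum, active + pcnt, 0, 0)
    else (total, active, psum + e.2, pcnt + 1)

def max_total_from_optimal_activation_order_alt (value : List Int) (limit : List Int) : Int :=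
  match (PySem.List.sorted (limit.zip value) (fun x => x.1) false).foldl pvBStep (0, 0, 0, 0) with
  | (total, _, psum, _) => total + psum

-- ===== PRECONDITION & SPEC =====
-- A indexes elements (length = min) by range(len(value)): IndexError iff len(limit) < len(value).
def Pre_max_total_from_optimal_activation_order (value : List Int) (limit : List Int) : Prop :=
  value.length ≤ limit.length
instance (value : List Int) (limit : List Int) : Decidable (Pre_max_total_from_optimal_activation_order value limit) := by unfold Pre_max_total_from_optimal_activation_order; infer_instance
def pvWitness_max_total_from_optimal_activation_order : List Int × List Int := ([2, 3], [1, 3])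

def Spec_max_total_from_optimal_activation_order (value : List Int) (limit : List Int) (out : Int) : Prop := out = max_total_from_optimal_activation_order_alt value limit
instance (value : List Int) (limit : List Int) (out : Int) : Decidable (Spec_max_total_from_optimal_activation_order value limit out) := by unfold Spec_max_total_from_optimal_activation_order; infer_instance

-- ===== CLAIM (what is proved, stated in full; the proofs are below) =====
def Claim_equal_max_total_from_optimal_activation_order : Prop := ∀ (value : List Int) (limit : List Int), Dom_max_total_from_optimal_activation_order value limit → Pre_max_total_from_optimal_activation_order value limit → Spec_max_total_from_optimal_activation_order value limit (max_total_from_optimal_activation_order value limit)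

-- ===== LEMMAS AND PROOFS =====
def pvSumV (h : List (Int × Int)) : Int := (h.map Prod.snd).sum

theorem pvDrainWhile_full (L : Int) (h : List (Int × Int)) (total active : Int)
    (hle : L ≤ active + 1) :
    pvDrainWhile L h total active = ([], total + pvSumV h, active + h.length) := by
  induction h generalizing total active with
  | nil => simp [pvDrainWhile, pvSumV]
  | cons x t ih =>
    obtain ⟨p, v⟩ := x
    simp only [pvDrainWhile, if_pos hle]
    rw [ih (total + v) (active + 1) (by omega)]
    simp [pvSumV]; constructor <;> ring

theorem pvDrainWhile_none (L : Int) (h : List (Int × Int)) (total active : Int)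
    (hgt : ¬ L ≤ active + 1) :
    pvDrainWhile L h total active = (h, total, active) := by
  cases h with
  | nil => simp [pvDrainWhile]
  | cons x t => obtain ⟨p, v⟩ := x; simp [pvDrainWhile, if_neg hgt]

theorem pvHeapPush_sum (h : List (Int × Int)) (x : Int × Int) :
    pvSumV (pvHeapPush h x) = pvSumV h + x.2 := by
  induction h with
  | nil => simp [pvHeapPush, pvSumV]
  | cons y t ih =>
    simp only [pvHeapPush]
    split_ifs <;> simp [pvSumV] at ih ⊢ <;> omega

theorem pvHeapPush_len (h : List (Int × Int)) (x : Int × Int) :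
    (pvHeapPush h x).length = h.length + 1 := by
  induction h with
  | nil => simp [pvHeapPush]
  | cons y t ih =>
    simp only [pvHeapPush]
    split_ifs <;> simp [ih]

theorem pvFinalDrain_eq (h : List (Int × Int)) (total : Int) :
    pvFinalDrain h total = total + pvSumV h := by
  induction h generalizing total with
  | nil => simp [pvFinalDrain, pvSumV]
  | cons x t ih =>
    obtain ⟨p, v⟩ := x
    simp [pvFinalDrain, ih, pvSumV]; ring

theorem pvLoop_rel (es : List (Int × Int)) :
    ∀ (heap : List (Int × Int)) (total active : Int),
    (match es.foldl pvAStep (heap, total, active),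
           es.foldl pvBStep (total, active, pvSumV heap, (heap.length : Int)) with
     | (h', t', a'), (tb, ab, ps, pc) =>
       t' = tb ∧ a' = ab ∧ pvSumV h' = ps ∧ (h'.length : Int) = pc) := by
  induction es with
  | nil => intro heap total active; simp
  | cons e t ih =>
    intro heap total active
    obtain ⟨L, v⟩ := e
    by_cases hle : L ≤ active + 1
    · have hA : pvAStep (heap, total, active) (L, v) =
          ([], total + pvSumV heap, active + heap.length) := by
        simp only [pvAStep, pvDrainWhile_full L heap total active hle]
        have : ¬ L > (active + (heap.length : Int)) + 1 := by
          have : (0:Int) ≤ heap.length := Int.natCast_nonneg _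
          omega
        simp [this]
      have hB : pvBStep (total, active, pvSumV heap, (heap.length : Int)) (L, v) =
          (total + pvSumV heap, active + heap.length, 0, 0) := by
        simp [pvBStep, hle]
      simp only [List.foldl_cons, hA, hB]
      have := ih [] (total + pvSumV heap) (active + heap.length)
      simpa [pvSumV] using this
    · have hA : pvAStep (heap, total, active) (L, v) =
          (pvHeapPush heap (-v, v), total, active) := by
        simp only [pvAStep, pvDrainWhile_none L heap total active hle]
        simp [show L > active + 1 by omega]
      have hB : pvBStep (total, active, pvSumV heap, (heap.length : Int)) (L, v) =
          (total, active, pvSumV heap + v, (heap.length : Int) + 1) := by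
        simp [pvBStep, hle]
      simp only [List.foldl_cons, hA, hB]
      have := ih (pvHeapPush heap (-v, v)) total active
      rw [pvHeapPush_sum, pvHeapPush_len] at this
      simpa using this

-- ===== VERDICT (by name: the statement is the Claim_ definition above) =====
theorem max_total_from_optimal_activation_order_spec : Claim_equal_max_total_from_optimal_activation_order := by
  intro value limit _ _
  unfold Spec_max_total_from_optimal_activation_order
  unfold max_total_from_optimal_activation_order max_total_from_optimal_activation_order_alt
  have h := pvLoop_rel (PySem.List.sorted (limit.zip value) (fun x => x.1) false) [] 0 0
  simp only [pvSumV, List.map_nil, List.sum_nil, List.length_nil, Nat.cast_zero] at h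
  rcases hA : (PySem.List.sorted (limit.zip value) (fun x => x.1) false).foldl pvAStep ([], 0, 0) with ⟨h', t', a'⟩
  rcases hB : (PySem.List.sorted (limit.zip value) (fun x => x.1) false).foldl pvBStep (0, 0, 0, 0) with ⟨tb, ab, ps, pc⟩
  rw [hA, hB] at h
  simp only at h
  simp only [hA, pvFinalDrain_eq, pvSumV]
  obtain ⟨h1, h2, h3, h4⟩ := h
  omega
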